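-- pv_equiv track=rewrite | github.com/david-constantinescu/ctf-helper | scripts/rop_finder.py | find_key_gadgets
-- ===== SOURCE A (Python) =====
-- def find_key_gadgets(gadgets):
--     """Find the most useful gadgets for common ROP patterns."""
--     wanted = {
--         'pop rdi; ret':          None,
--         'pop rsi; ret':          None,
--         'pop rsi; pop r15; ret': None,
--         'pop rdx; ret':          None,
--         'pop rax; ret':          None,
--         'pop rbp; ret':          None,
--         'pop rcx; ret':          None,
--         'syscall; ret':          None,
--         'syscall':               None,
--         'int 0x80; ret':         None,
--         'ret':                   None,
--         'leave; ret':            None,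
--         'mov rdi, rsp; ret':     None,
--         'mov rdi, rbp; ret':     None,
--         'xor rax, rax; ret':     None,
--         'xor eax, eax; ret':     None,
--         'pop rsp; ret':          None,
--         'add rsp, 8; ret':       None,
--     }
--     for pattern in wanted:
--         # Exact match first
--         if pattern in gadgets:
--             wanted[pattern] = gadgets[pattern]
--         else:
--             # Fuzzy: check if any gadget contains this
--             for g, addr in gadgets.items():
--                 if pattern in g:
--                     wanted[pattern] = addr
--                     break
--     return wanted
-- ===== SOURCE B (Python) =====
-- PATTERNS = ['pop rdi; ret', 'pop rsi; ret', 'pop rsi; pop r15; ret', 'pop rdx; ret',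
--             'pop rax; ret', 'pop rbp; ret', 'pop rcx; ret', 'syscall; ret', 'syscall',
--             'int 0x80; ret', 'ret', 'leave; ret', 'mov rdi, rsp; ret', 'mov rdi, rbp; ret',
--             'xor rax, rax; ret', 'xor eax, eax; ret', 'pop rsp; ret', 'add rsp, 8; ret']
--
-- def find_key_gadgets(gadgets):
--     """Single pass over the gadgets: collect exact hits and first fuzzy hits per pattern."""
--     exact = {}
--     fuzzy = {}
--     for g, addr in gadgets.items():
--         for p in PATTERNS:
--             if p in g:
--                 if g == p:
--                     exact[p] = addr
--                 else:
--                     fuzzy.setdefault(p, addr)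
--     return {p: exact.get(p, fuzzy.get(p)) for p in PATTERNS}
-- ===== Notes on version B (the rewrite author's own statement) =====
-- stated objective: alternative
-- what changed: Replaces A's per-pattern scans (membership test then an inner fuzzy scan over all gadgets for each of the 18 patterns) by a single pass over the gadgets that fills an exact-hit dict and a first-fuzzy-hit dict, assembled at the end.
import Mathlib
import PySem

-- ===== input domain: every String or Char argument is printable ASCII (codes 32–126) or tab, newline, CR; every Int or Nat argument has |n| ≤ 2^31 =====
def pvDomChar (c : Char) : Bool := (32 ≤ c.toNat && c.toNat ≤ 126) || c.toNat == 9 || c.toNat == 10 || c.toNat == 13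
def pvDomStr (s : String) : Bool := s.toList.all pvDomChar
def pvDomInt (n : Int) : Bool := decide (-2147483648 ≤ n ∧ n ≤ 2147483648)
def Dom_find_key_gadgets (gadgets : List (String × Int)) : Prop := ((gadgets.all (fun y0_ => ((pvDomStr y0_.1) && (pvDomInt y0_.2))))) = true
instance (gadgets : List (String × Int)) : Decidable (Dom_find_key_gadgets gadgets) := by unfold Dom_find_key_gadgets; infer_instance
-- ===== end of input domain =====

-- B replaces A's per-pattern scans (membership test, then an inner fuzzy scan per pattern)
-- by a single pass over the gadgets filling an exact-hit dict and a first-fuzzy-hit dict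
-- (alternative decomposition; return value only, neither side mutates its argument).

-- ===== PORT A =====
def patternsA : List String :=
  ["pop rdi; ret", "pop rsi; ret", "pop rsi; pop r15; ret", "pop rdx; ret",
   "pop rax; ret", "pop rbp; ret", "pop rcx; ret", "syscall; ret", "syscall",
   "int 0x80; ret", "ret", "leave; ret", "mov rdi, rsp; ret", "mov rdi, rbp; ret",
   "xor rax, rax; ret", "xor eax, eax; ret", "pop rsp; ret", "add rsp, 8; ret"]

-- inner 'for g, addr in gadgets.items(): if pattern in g: wanted[pattern] = addr; break'
def fuzzyScan (pattern : String) (items : List (String × Int))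
    (w : PySem.Dict String (Option Int)) : PySem.Dict String (Option Int) :=
  match items with
  | [] => w
  | (g, addr) :: rest =>
    if PySem.Str.isIn pattern g then w.insert pattern (some addr)
    else fuzzyScan pattern rest w

-- body of 'for pattern in wanted' (the loop only rewrites values, so the key list is fixed)
def aStep (d : PySem.Dict String Int) (w : PySem.Dict String (Option Int))
    (pattern : String) : PySem.Dict String (Option Int) :=
  if d.contains pattern then w.insert pattern (d.get? pattern)
  else fuzzyScan pattern d.items w

def find_key_gadgets (gadgets : List (String × Int)) : List (String × Option Int) :=
  let d : PySem.Dict String Int := PySem.Dict.ofList gadgets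
  let wanted : PySem.Dict String (Option Int) :=
    PySem.Dict.ofList (patternsA.map (fun p => (p, (none : Option Int))))
  (patternsA.foldl (aStep d) wanted).items

-- ===== PORT B =====
def patternsB : List String :=
  ["pop rdi; ret", "pop rsi; ret", "pop rsi; pop r15; ret", "pop rdx; ret",
   "pop rax; ret", "pop rbp; ret", "pop rcx; ret", "syscall; ret", "syscall",
   "int 0x80; ret", "ret", "leave; ret", "mov rdi, rsp; ret", "mov rdi, rbp; ret",
   "xor rax, rax; ret", "xor eax, eax; ret", "pop rsp; ret", "add rsp, 8; ret"]

-- body of the inner 'for p in PATTERNS' loop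
def innerStep (g : String) (addr : Int)
    (st : PySem.Dict String Int × PySem.Dict String Int) (p : String) :
    PySem.Dict String Int × PySem.Dict String Int :=
  if PySem.Str.isIn p g then
    if g == p then (st.1.insert p addr, st.2)
    else (st.1, st.2.setdefault p addr)
  else st

-- one iteration of 'for g, addr in gadgets.items()'
def gadgetStep (st : PySem.Dict String Int × PySem.Dict String Int) (x : String × Int) :
    PySem.Dict String Int × PySem.Dict String Int :=
  patternsB.foldl (innerStep x.1 x.2) st

def find_key_gadgets_alt (gadgets : List (String × Int)) : List (String × Option Int) :=
  let st := (PySem.Dict.ofList gadgets).items.foldl gadgetStep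
              (PySem.Dict.empty, PySem.Dict.empty)
  -- '{p: exact.get(p, fuzzy.get(p)) for p in PATTERNS}'
  (patternsB.foldl
      (fun out p => out.insert p ((st.1.get? p).or (st.2.get? p)))
      (PySem.Dict.empty : PySem.Dict String (Option Int))).items

-- ===== PRECONDITION & SPEC =====
def Spec_find_key_gadgets (gadgets : List (String × Int)) (out : List (String × Option Int)) : Prop := out = find_key_gadgets_alt gadgets
instance (gadgets : List (String × Int)) (out : List (String × Option Int)) : Decidable (Spec_find_key_gadgets gadgets out) := by unfold Spec_find_key_gadgets; infer_instance

-- ===== CLAIM (what is proved, stated in full; the proofs are below) =====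
def Claim_equal_find_key_gadgets : Prop := ∀ (gadgets : List (String × Int)), Dom_find_key_gadgets gadgets → Spec_find_key_gadgets gadgets (find_key_gadgets gadgets)

-- ===== LEMMAS AND PROOFS =====

theorem charsIsIn_self (cs : List Char) : PySem.Chars.isIn cs cs = true := by
  rw [PySem.Chars.isIn_iff_infix]

theorem innerStep_fst (g : String) (a : Int) (st) (q : String) :
    (innerStep g a st q).1 = if g = q then st.1.insert q a else st.1 := by
  by_cases h : g = q
  · subst h; simp [innerStep, charsIsIn_self]
  · simp only [innerStep, beq_iff_eq, h, if_false]
    split_ifs <;> rfl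

theorem innerStep_snd (g : String) (a : Int) (st) (q : String) :
    (innerStep g a st q).2
      = if PySem.Str.isIn q g = true ∧ g ≠ q then st.2.setdefault q a else st.2 := by
  simp only [innerStep, beq_iff_eq]
  split_ifs with h1 h2 h3 <;> simp_all

theorem inner_fst_get (L : List String) (g : String) (a : Int)
    (st : PySem.Dict String Int × PySem.Dict String Int) (p : String) :
    ((L.foldl (innerStep g a) st).1.get? p
      = if g = p ∧ p ∈ L then some a else st.1.get? p) := by
  induction L generalizing st with
  | nil => simp
  | cons q L ih =>
    simp only [List.foldl_cons, ih, List.mem_cons]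
    by_cases hgp : g = p
    · subst hgp
      by_cases hL : g ∈ L
      · simp [hL]
      · by_cases hgq : g = q
        · subst hgq
          simp [hL, innerStep_fst]
        · simp [hL, innerStep_fst, fun h : g = q => hgq h]
    · simp only [hgp, false_and, if_false]
      rw [innerStep_fst]
      split_ifs with h
      · subst h; exact PySem.Dict.get?_insert_of_ne _ _ (fun h : p = g => hgp h.symm)
      · rfl

theorem inner_snd_get (L : List String) (g : String) (a : Int)
    (st : PySem.Dict String Int × PySem.Dict String Int) (p : String) :
    ((L.foldl (innerStep g a) st).2.get? p
      = if (PySem.Str.isIn p g = true ∧ g ≠ p) ∧ p ∈ L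
        then some ((st.2.get? p).getD a) else st.2.get? p) := by
  induction L generalizing st with
  | nil => simp
  | cons q L ih =>
    simp only [List.foldl_cons, ih, List.mem_cons]
    rw [innerStep_snd]
    by_cases hfire : PySem.Str.isIn p g = true ∧ g ≠ p
    · by_cases hpq : p = q
      · subst hpq
        obtain ⟨hin, hne⟩ := hfire
        have hsd : (if PySem.Str.isIn p g = true ∧ g ≠ p then st.2.setdefault p a else st.2)
            = st.2.setdefault p a := if_pos ⟨hin, hne⟩
        have hin' : PySem.Chars.isIn p.toList g.toList = true := by
          simpa [PySem.Str.isIn] using hin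
        rw [hsd, PySem.Dict.get?_setdefault_self]
        by_cases hL : p ∈ L <;> simp [hin', hne, hL]
      · have hne : (if PySem.Str.isIn q g = true ∧ g ≠ q then st.2.setdefault q a else st.2).get? p = st.2.get? p := by
          split_ifs with h
          · exact PySem.Dict.get?_setdefault_of_ne _ _ hpq
          · rfl
        rw [hne]
        simp [hfire, hpq]
    · have hnofire : ¬ ((PySem.Str.isIn p g = true ∧ g ≠ p) ∧ (p = q ∨ p ∈ L)) := fun h => hfire h.1
      have hnofire' : ¬ ((PySem.Str.isIn p g = true ∧ g ≠ p) ∧ p ∈ L) := fun h => hfire h.1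
      rw [if_neg hnofire, if_neg hnofire']
      split_ifs with h2
      · have hpq : p ≠ q := by rintro rfl; exact hfire h2
        exact PySem.Dict.get?_setdefault_of_ne _ _ hpq
      · rfl

theorem outer_fst_get (items : List (String × Int))
    (st : PySem.Dict String Int × PySem.Dict String Int) (p : String)
    (hp : p ∈ patternsB) (hnd : (items.map (·.1)).Nodup) :
    ((items.foldl gadgetStep st).1.get? p
      = match items.find? (fun x => x.1 == p) with
        | some x => some x.2
        | none => st.1.get? p) := by
  induction items generalizing st with
  | nil => simp
  | cons x items ih =>
    simp only [List.map_cons, List.nodup_cons] at hnd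
    simp only [List.foldl_cons, ih _ hnd.2, gadgetStep, inner_fst_get, List.find?_cons]
    by_cases hxp : x.1 = p
    · have hfind : items.find? (fun y => y.1 == p) = none := by
        rw [List.find?_eq_none]
        intro y hy
        simp only [beq_iff_eq]
        intro hyp
        exact hnd.1 (hxp ▸ hyp ▸ List.mem_map_of_mem hy)
      simp [hxp, hp, hfind]
    · rw [show (x.1 == p) = false from beq_eq_false_iff_ne.mpr hxp,
          if_neg (fun h => hxp h.1)]

theorem outer_snd_get (items : List (String × Int))
    (st : PySem.Dict String Int × PySem.Dict String Int) (p : String)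
    (hp : p ∈ patternsB) :
    ((items.foldl gadgetStep st).2.get? p
      = match st.2.get? p with
        | some v => some v
        | none => (items.find? (fun x => PySem.Str.isIn p x.1 && !(x.1 == p))).map (·.2)) := by
  induction items generalizing st with
  | nil => cases h : st.2.get? p <;> simp [h]
  | cons x items ih =>
    simp only [List.foldl_cons, ih, gadgetStep, inner_snd_get, List.find?_cons]
    by_cases hfire : PySem.Str.isIn p x.1 = true ∧ x.1 ≠ p
    · have h2 : (x.1 == p) = false := beq_eq_false_iff_ne.mpr hfire.2
      have hin' : PySem.Chars.isIn p.toList x.1.toList = true := by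
        simpa [PySem.Str.isIn] using hfire.1
      have hb : (PySem.Chars.isIn p.toList x.1.toList && !(x.1 == p)) = true := by
        simp [hin', h2]
      rw [if_pos ⟨hfire, hp⟩]
      cases h : st.2.get? p <;> simp [h, hb, PySem.Str.isIn]
    · have hb : (PySem.Chars.isIn p.toList x.1.toList && !(x.1 == p)) = false := by
        rcases (not_and_or.mp hfire) with h | h
        · have hin0 : PySem.Chars.isIn p.toList x.1.toList = false := by
            have := eq_false_of_ne_true h
            simpa [PySem.Str.isIn] using this
          simp [hin0]
        · simp at h
          simp [h]
      rw [if_neg (fun hh => hfire hh.1)]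
      cases h : st.2.get? p <;> simp [h, hb, PySem.Str.isIn]

theorem fuzzyScan_getD (q : String) (items : List (String × Int))
    (w : PySem.Dict String (Option Int)) (p : String) :
    (fuzzyScan q items w).getD p none
      = if p = q then
          (match items.find? (fun x => PySem.Str.isIn q x.1) with
           | some x => some x.2
           | none => w.getD q none)
        else w.getD p none := by
  induction items generalizing w with
  | nil => by_cases h : p = q <;> simp [fuzzyScan, h]
  | cons x rest ih =>
    obtain ⟨g, addr⟩ := x
    simp only [fuzzyScan, List.find?_cons]
    by_cases hin : PySem.Str.isIn q g = true
    · have hin' : (PySem.Chars.isIn q.toList g.toList) = true := by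
        simpa [PySem.Str.isIn] using hin
      rw [if_pos hin]
      by_cases h : p = q
      · subst h
        simp [hin', PySem.Dict.getD_eq_get?_getD, PySem.Dict.get?_insert_self]
      · simp only [h, if_false, hin']
        rw [PySem.Dict.getD_eq_get?_getD, PySem.Dict.get?_insert_of_ne _ _ h,
            ← PySem.Dict.getD_eq_get?_getD]
    · have hin' : (PySem.Chars.isIn q.toList g.toList) = false := by
        have := eq_false_of_ne_true hin
        simpa [PySem.Str.isIn] using this
      rw [if_neg hin, ih]
      simp [hin']

theorem fuzzyScan_keys (q : String) (items : List (String × Int))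
    (w : PySem.Dict String (Option Int)) (hq : w.contains q = true) :
    (fuzzyScan q items w).keys = w.keys := by
  induction items generalizing w with
  | nil => rfl
  | cons x rest ih =>
    obtain ⟨g, addr⟩ := x
    simp only [fuzzyScan]
    split_ifs with h
    · exact PySem.Dict.keys_insert_of_contains _ _ hq
    · exact ih _ hq

theorem aStep_keys (d : PySem.Dict String Int) (w : PySem.Dict String (Option Int))
    (q : String) (hq : w.contains q = true) : (aStep d w q).keys = w.keys := by
  unfold aStep
  split_ifs with h
  · exact PySem.Dict.keys_insert_of_contains _ _ hq
  · exact fuzzyScan_keys _ _ _ hq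

theorem aFold_keys (d : PySem.Dict String Int) (L : List String)
    (w : PySem.Dict String (Option Int)) (h : ∀ q ∈ L, w.contains q = true) :
    (L.foldl (aStep d) w).keys = w.keys := by
  induction L generalizing w with
  | nil => rfl
  | cons q L ih =>
    have hk : (aStep d w q).keys = w.keys := aStep_keys d w q (h q (by simp))
    have h' : ∀ r ∈ L, (aStep d w q).contains r = true := by
      intro r hr
      rw [PySem.Dict.contains_iff_mem_keys] at *
      rw [hk]
      exact (PySem.Dict.contains_iff_mem_keys w r).mp (h r (by simp [hr]))
    simp only [List.foldl_cons]
    rw [ih _ h', hk]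

theorem aFold_getD (d : PySem.Dict String Int) (L : List String)
    (w : PySem.Dict String (Option Int)) (hnd : L.Nodup)
    (h0 : ∀ q ∈ L, w.getD q none = none) (p : String) :
    ((L.foldl (aStep d) w).getD p none
      = if p ∈ L then
          (if d.contains p then d.get? p
           else (d.items.find? (fun x => PySem.Str.isIn p x.1)).map (·.2))
        else w.getD p none) := by
  induction L generalizing w with
  | nil => simp
  | cons q L ih =>
    simp only [List.nodup_cons] at hnd
    have h0' : ∀ r ∈ L, (aStep d w q).getD r none = none := by
      intro r hr
      have hrq : r ≠ q := fun hh => hnd.1 (hh ▸ hr)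
      have : (aStep d w q).getD r none = w.getD r none := by
        unfold aStep
        split_ifs with h
        · rw [PySem.Dict.getD_eq_get?_getD, PySem.Dict.get?_insert_of_ne _ _ hrq,
              ← PySem.Dict.getD_eq_get?_getD]
        · rw [fuzzyScan_getD, if_neg hrq]
      rw [this]
      exact h0 r (by simp [hr])
    simp only [List.foldl_cons, ih _ hnd.2 h0', List.mem_cons]
    by_cases hL : p ∈ L
    · simp [hL]
    · simp only [hL, if_false, or_false]
      by_cases hpq : p = q
      · subst hpq
        simp only [if_pos rfl, eq_self_iff_true, true_or, if_pos]
        unfold aStep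
        split_ifs with h
        · rw [PySem.Dict.getD_eq_get?_getD, PySem.Dict.get?_insert_self, Option.getD_some]
        · rw [fuzzyScan_getD, if_pos rfl]
          cases hf : d.items.find? (fun x => PySem.Str.isIn p x.1) with
          | some x => simp
          | none => simp [h0 p (by simp)]
      · have hstep : (aStep d w q).getD p none = w.getD p none := by
          unfold aStep
          split_ifs with h
          · rw [PySem.Dict.getD_eq_get?_getD, PySem.Dict.get?_insert_of_ne _ _ hpq,
                ← PySem.Dict.getD_eq_get?_getD]
          · rw [fuzzyScan_getD, if_neg hpq]
        simp [hpq, hstep]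

theorem find?_congr_mem {α : Type} (l : List α) (p q : α → Bool)
    (h : ∀ x ∈ l, p x = q x) : l.find? p = l.find? q := by
  induction l with
  | nil => rfl
  | cons x l ih =>
    simp only [List.find?_cons, h x (by simp)]
    cases q x
    · exact ih (fun y hy => h y (by simp [hy]))
    · rfl

set_option maxHeartbeats 2000000 in
theorem main_eq (gadgets : List (String × Int)) :
    find_key_gadgets gadgets = find_key_gadgets_alt gadgets := by
  unfold find_key_gadgets find_key_gadgets_alt
  set d : PySem.Dict String Int := PySem.Dict.ofList gadgets with hd
  set wanted : PySem.Dict String (Option Int) :=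
    PySem.Dict.ofList (patternsA.map (fun p => (p, (none : Option Int)))) with hw
  set st := d.items.foldl gadgetStep (PySem.Dict.empty, PySem.Dict.empty) with hst
  set wA := patternsA.foldl (aStep d) wanted with hwA
  have hknd : (d.items.map (fun x => x.1)).Nodup := by
    have := PySem.Dict.nodup_keys_ofList gadgets
    simpa [PySem.Dict.keys] using this
  have hcont : ∀ q ∈ patternsA, wanted.contains q = true := by decide
  have hkeysA : wA.keys = patternsA := by
    rw [hwA, aFold_keys d patternsA wanted hcont]
    decide
  have hndA : wA.keys.Nodup := by rw [hkeysA]; decide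
  have hAitems : wA.items = patternsA.map (fun k => (k, wA.getD k none)) := by
    rw [PySem.Dict.items_eq_map_keys wA hndA none, hkeysA]
  have hBitems : (patternsB.foldl
      (fun out p => out.insert p ((st.1.get? p).or (st.2.get? p)))
      (PySem.Dict.empty : PySem.Dict String (Option Int))).items
      = patternsB.map (fun p => (p, (st.1.get? p).or (st.2.get? p))) := by
    have := PySem.Dict.items_foldl_insert_fresh patternsB (fun p => p)
      (fun p => (st.1.get? p).or (st.2.get? p))
      (PySem.Dict.empty : PySem.Dict String (Option Int))
      (by intro a _; rfl) (by decide)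
    simpa using this
  rw [hAitems, hBitems]
  have hpp : patternsA = patternsB := rfl
  rw [hpp]
  apply List.map_congr_left
  intro p hp
  have hpA : p ∈ patternsA := hpp ▸ hp
  have hA : wA.getD p none
      = if d.contains p then d.get? p
        else (d.items.find? (fun x => PySem.Str.isIn p x.1)).map (·.2) := by
    rw [hwA, aFold_getD d patternsA wanted (by decide) (by decide) p, if_pos hpA]
  have hB1 : st.1.get? p
      = (d.items.find? (fun x => x.1 == p)).map (·.2) := by
    rw [hst, outer_fst_get d.items (PySem.Dict.empty, PySem.Dict.empty) p hp hknd]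
    cases h : d.items.find? (fun x => x.1 == p) <;> simp [h, PySem.Dict.get?_empty]
  have hB2 : st.2.get? p
      = (d.items.find? (fun x => PySem.Str.isIn p x.1 && !(x.1 == p))).map (·.2) := by
    rw [hst, outer_snd_get d.items (PySem.Dict.empty, PySem.Dict.empty) p hp]
    simp [PySem.Dict.get?_empty]
  refine Prod.ext rfl ?_
  show wA.getD p none = (st.1.get? p).or (st.2.get? p)
  rw [hA, hB1, hB2]
  cases hf : d.items.find? (fun x => x.1 == p) with
  | some x =>
    have hx1 : x.1 = p := by
      have := List.find?_some hf
      simpa using this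
    have hxmem : x ∈ d.items := List.mem_of_find?_eq_some hf
    have hget : d.get? p = some x.2 := by
      apply PySem.Dict.get?_of_mem_items (k := p) (v := x.2)
      · rw [← hx1]; exact hxmem
      · simpa [PySem.Dict.keys] using hknd
    have hcontp : d.contains p = true := by
      rw [PySem.Dict.contains_eq_isSome_get?, hget]; rfl
    simp [hcontp, hget]
  | none =>
    have hnone : ∀ x ∈ d.items, (x.1 == p) = false := by
      intro x hx
      have h1 : ¬ ((fun x : String × Int => x.1 == p) x = true) :=
        List.find?_eq_none.mp hf x hx
      simpa using h1
    have hget : d.get? p = none := by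
      cases hg : d.get? p with
      | none => rfl
      | some v =>
        have h2 := hnone (p, v) (PySem.Dict.mem_items_of_get?_eq_some d hg)
        simp at h2
    have hcontp : d.contains p = false := by
      rw [PySem.Dict.contains_eq_isSome_get?, hget]; rfl
    have hfind : d.items.find? (fun x => PySem.Str.isIn p x.1 && !(x.1 == p))
        = d.items.find? (fun x => PySem.Str.isIn p x.1) := by
      apply find?_congr_mem
      intro x hx
      simp [hnone x hx]
    rw [hfind, hcontp]
    simp

-- ===== VERDICT (by name: the statement is the Claim_ definition above) =====
theorem find_key_gadgets_spec : Claim_equal_find_key_gadgets := by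
  intro gadgets _
  unfold Spec_find_key_gadgets
  exact main_eq gadgets
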